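-- pv_equiv track=rewrite | github.com/cjackson98/CSE-231 | Projects/proj09.py | get_tags_by_month_for_users
-- ===== SOURCE A (Python) =====
-- from operator import itemgetter#used for sorting later on
--
-- def get_tags_by_month_for_users(data,usernames):
--     '''creates a list of tuples where each tuple is in the form (month,{unique hashtags}.
--     The list should be 12 items long (one for each month). Returns the list'''
--     #[ ( 1 , { } ) , ( 2 , { } ) ]
--     hashtags_month=[]
--     hashtag_tuple=()
--     sorted_data=sorted(data,key=itemgetter(1))#sort the data
--     for i in range(1,13):#for the 12 months
--         hashtag_set=set()#resets the set for each month
--         for line in sorted_data: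
--             if i==line[1]:
--                 for item in line[2]:
--                     hashtag_set.add(item)#add hashtag to the set (wont add duplicates)
--         hashtag_tuple=(i,hashtag_set)#make a tuple of the month and the set of hashtags
--         hashtags_month.append(hashtag_tuple)#hadd the tuple to the list
--     return hashtags_month
-- ===== SOURCE B (Python) =====
-- def get_tags_by_month_for_users(data, usernames):
--     '''One pass over data distributing each line's hashtags into a dict keyed by
--     month, then read months 1..12 back out (missing months get a fresh empty set).'''
--     table = {}
--     for line in data:
--         tags = table.get(line[1], set())
--         for item in line[2]:
--             tags.add(item)
--         table[line[1]] = tags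
--     return [(i, table.get(i, set())) for i in range(1, 13)]
-- ===== Notes on version B (the rewrite author's own statement) =====
-- stated objective: simpler
-- what changed: Replaces A's sort plus twelve full rescans of the data with a single distributing pass into a month-keyed dict, then reads months 1..12 out of the table.
import Mathlib
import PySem

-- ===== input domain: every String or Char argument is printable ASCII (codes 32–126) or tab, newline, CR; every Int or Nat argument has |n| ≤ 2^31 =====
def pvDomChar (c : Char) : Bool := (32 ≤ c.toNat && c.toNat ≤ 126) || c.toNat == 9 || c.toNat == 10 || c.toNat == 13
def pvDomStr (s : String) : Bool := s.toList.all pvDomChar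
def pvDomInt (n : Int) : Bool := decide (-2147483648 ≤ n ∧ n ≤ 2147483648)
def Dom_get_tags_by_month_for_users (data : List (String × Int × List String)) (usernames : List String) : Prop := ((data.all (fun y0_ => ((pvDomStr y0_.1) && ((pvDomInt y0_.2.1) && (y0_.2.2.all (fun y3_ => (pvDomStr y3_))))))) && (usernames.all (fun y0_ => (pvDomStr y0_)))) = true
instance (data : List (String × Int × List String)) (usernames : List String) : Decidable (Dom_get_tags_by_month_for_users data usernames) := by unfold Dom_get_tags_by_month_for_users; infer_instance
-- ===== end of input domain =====

-- B replaces A's sort + twelve rescans by one distributing pass into a month-keyed dict (simpler, one pass).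

-- ===== PORT A =====
def get_tags_by_month_for_users (data : List (String × Int × List String)) (usernames : List String) : List (Int × List String) :=
  let sorted_data := PySem.List.sorted data (fun line => line.2.1) false
  (PySem.List.pyRange 1 13 1).foldl (fun hashtags_month i =>
    let hashtag_set := sorted_data.foldl (fun s line =>
      if i == line.2.1 then line.2.2.foldl (fun s item => PySem.Set.add s item) s else s)
      (PySem.Set.empty : PySem.Set String)
    hashtags_month ++ [(i, hashtag_set)]) []

-- ===== PORT B =====
def get_tags_by_month_for_users_alt (data : List (String × Int × List String)) (usernames : List String) : List (Int × List String) :=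
  let table := data.foldl (fun t line =>
      t.modify line.2.1 (PySem.Set.empty : PySem.Set String)
        (fun tags => line.2.2.foldl (fun s item => PySem.Set.add s item) tags))
    PySem.Dict.empty
  (PySem.List.pyRange 1 13 1).map (fun i => (i, table.getD i (PySem.Set.empty : PySem.Set String)))

-- ===== PRECONDITION & SPEC =====
def Spec_get_tags_by_month_for_users (data : List (String × Int × List String)) (usernames : List String) (out : List (Int × List String)) : Prop := out = get_tags_by_month_for_users_alt data usernames
instance (data : List (String × Int × List String)) (usernames : List String) (out : List (Int × List String)) : Decidable (Spec_get_tags_by_month_for_users data usernames out) := by unfold Spec_get_tags_by_month_for_users; infer_instance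

-- ===== CLAIM (what is proved, stated in full; the proofs are below) =====
def Claim_equal_get_tags_by_month_for_users : Prop := ∀ (data : List (String × Int × List String)) (usernames : List String), Dom_get_tags_by_month_for_users data usernames → Spec_get_tags_by_month_for_users data usernames (get_tags_by_month_for_users data usernames)

-- ===== LEMMAS AND PROOFS =====

-- B side: looking up month i after the distributing fold is the tag-fold over the lines of month i, in data order.
lemma pvGetD_fold_modify (data : List (String × Int × List String)) (d : PySem.Dict Int (PySem.Set String)) (i : Int) :
    (data.foldl (fun t line =>
        t.modify line.2.1 (PySem.Set.empty : PySem.Set String)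
          (fun tags => line.2.2.foldl (fun s item => PySem.Set.add s item) tags)) d).getD i PySem.Set.empty
      = (data.filter (fun line => i == line.2.1)).foldl
          (fun s line => line.2.2.foldl (fun s item => PySem.Set.add s item) s)
          (d.getD i PySem.Set.empty) := by
  induction data generalizing d with
  | nil => rfl
  | cons l ls ih =>
    simp only [List.foldl_cons, List.filter_cons]
    rw [ih]
    by_cases h : i = l.2.1
    · simp [h, PySem.Dict.getD_modify_self]
    · simp [PySem.Dict.getD_modify, h]

-- insertBy is stable: filtering the month-i lines out of an insertion into a key-sorted list appends.
lemma pvFilter_insertBy {α : Type} (key : α → Int) (i : Int) (x : α) (acc : List α)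
    (h : acc.Pairwise (fun a b => key a ≤ key b)) :
    (PySem.List.insertBy (fun a b => decide (key a < key b)) x acc).filter (fun y => i == key y)
      = if i == key x then acc.filter (fun y => i == key y) ++ [x]
        else acc.filter (fun y => i == key y) := by
  induction acc with
  | nil =>
    rw [PySem.List.insertBy]
    by_cases hx : i = key x <;> simp [hx]
  | cons y ys ih =>
    rw [List.pairwise_cons] at h
    rw [PySem.List.insertBy]
    by_cases hb : key x < key y
    · simp only [hb, decide_true, if_true]
      by_cases hi : i = key x
      · have hnil : (y :: ys).filter (fun z => i == key z) = [] := by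
          rw [List.filter_eq_nil_iff]
          intro z hz
          have : key x < key z := by
            rcases List.mem_cons.mp hz with hz | hz
            · subst hz; exact hb
            · exact lt_of_lt_of_le hb (h.1 z hz)
          simp only [beq_iff_eq]
          omega
        subst hi
        simp [hnil]
      · simp [List.filter_cons, hi, beq_iff_eq]
    · have hbf : decide (key x < key y) = false := by simpa using hb
      rw [hbf, if_neg (by simp), List.filter_cons, List.filter_cons, ih h.2]
      by_cases hy : i = key y <;> by_cases hx : i = key x <;>
        simp [hy, hx] <;> split_ifs <;> simp

-- sorting by month is stable, so the month-i lines of sorted(data) are those of data, in order.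
lemma pvFilter_sorted (data : List (String × Int × List String)) (i : Int) :
    (PySem.List.sorted data (fun l => l.2.1) false).filter (fun l => i == l.2.1)
      = data.filter (fun l => i == l.2.1) := by
  induction data using List.reverseRecOn with
  | nil => rfl
  | append_singleton xs x ih =>
    rw [PySem.List.sorted_eq_foldl_insertBy, List.foldl_append, List.foldl_cons, List.foldl_nil,
        ← PySem.List.sorted_eq_foldl_insertBy,
        pvFilter_insertBy (fun l => l.2.1) i x _ (PySem.List.sorted_pairwise xs (fun l => l.2.1)),
        List.filter_append, ih, List.filter_cons, List.filter_nil]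
    by_cases hx : i = x.2.1 <;> simp [hx]

-- ===== VERDICT (by name: the statement is the Claim_ definition above) =====
theorem get_tags_by_month_for_users_spec : Claim_equal_get_tags_by_month_for_users := by
  intro data usernames _
  unfold Spec_get_tags_by_month_for_users get_tags_by_month_for_users get_tags_by_month_for_users_alt
  rw [PySem.List.foldl_append_singleton_eq_map, List.nil_append]
  refine List.map_congr_left (fun i _ => ?_)
  rw [← List.foldl_filter, pvFilter_sorted, pvGetD_fold_modify]
  rfl
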